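-- pv_equiv track=rewrite | github.com/MxSAAHIL/AI-Powered-Company-Policy-Chatbot | app/data_loader.py | _is_likely_noise_column
-- ===== SOURCE A (Python) =====
-- def _is_likely_noise_column(column_name: str) -> bool:
--     lowered = column_name.lower()
--     noise_terms = [
--         "id",
--         "index",
--         "label",
--         "score",
--         "class",
--         "target",
--         "date",
--         "time",
--         "url",
--         "link",
--         "source",
--         "path",
--         "file",
--         "name",
--         "title",
--     ]
--     return any(term == lowered or lowered.endswith(f"_{term}") for term in noise_terms)
-- ===== SOURCE B (Python) =====
-- _NOISE_TERMS = {
--     "id", "index", "label", "score", "class", "target", "date", "time",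
--     "url", "link", "source", "path", "file", "name", "title",
-- }
--
--
-- def _is_likely_noise_column(column_name: str) -> bool:
--     return column_name.lower().rsplit('_', 1)[-1] in _NOISE_TERMS
-- ===== Notes on version B (the rewrite author's own statement) =====
-- stated objective: simpler
-- what changed: B extracts the trailing '_'-segment of the lowercased name once with rsplit('_', 1)[-1] and does a single set-membership test, replacing A's per-term loop of equality/endswith checks.
import Mathlib
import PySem

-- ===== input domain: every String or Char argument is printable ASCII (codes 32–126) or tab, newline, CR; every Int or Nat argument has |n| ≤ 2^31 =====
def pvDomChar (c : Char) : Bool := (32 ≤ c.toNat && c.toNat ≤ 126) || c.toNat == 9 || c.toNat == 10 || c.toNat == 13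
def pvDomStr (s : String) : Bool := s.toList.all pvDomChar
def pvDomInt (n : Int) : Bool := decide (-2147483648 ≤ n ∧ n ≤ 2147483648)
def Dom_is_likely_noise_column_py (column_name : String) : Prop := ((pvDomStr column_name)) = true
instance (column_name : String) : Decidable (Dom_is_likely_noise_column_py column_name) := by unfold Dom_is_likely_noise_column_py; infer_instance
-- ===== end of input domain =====

-- B replaces A's per-term equality/endswith loop by one suffix extraction plus a set-membership test (simpler).

-- ===== PORT A =====
def is_likely_noise_column_py (column_name : String) : Bool :=
  let lowered := PySem.Str.lower column_name
  let noise_terms : List String :=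
    ["id", "index", "label", "score", "class", "target", "date", "time",
     "url", "link", "source", "path", "file", "name", "title"]
  noise_terms.any (fun term => term == lowered || PySem.Str.endswith lowered ("_" ++ term))

-- ===== PORT B =====
def pvNoiseSet : PySem.Set String :=
  PySem.Set.ofList
    ["id", "index", "label", "score", "class", "target", "date", "time",
     "url", "link", "source", "path", "file", "name", "title"]

def is_likely_noise_column_py_alt (column_name : String) : Bool :=
  let lowered := PySem.Str.lower column_name
  -- lowered.rsplit('_', 1)[-1], ported by hand (PySem has no rsplit): exact — the
  -- segment after the LAST '_', or the whole string when there is no '_'.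
  let last := String.ofList ((lowered.toList.reverse.takeWhile (fun c => c != '_')).reverse)
  pvNoiseSet.contains last

-- ===== PRECONDITION & SPEC =====
def Spec_is_likely_noise_column_py (column_name : String) (out : Bool) : Prop := out = is_likely_noise_column_py_alt column_name
instance (column_name : String) (out : Bool) : Decidable (Spec_is_likely_noise_column_py column_name out) := by unfold Spec_is_likely_noise_column_py; infer_instance

-- ===== CLAIM (what is proved, stated in full; the proofs are below) =====
def Claim_equal_is_likely_noise_column_py : Prop := ∀ (column_name : String), Dom_is_likely_noise_column_py column_name → Spec_is_likely_noise_column_py column_name (is_likely_noise_column_py column_name)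

-- ===== LEMMAS AND PROOFS =====

-- takeWhile over a block free of '_', stopped by an explicit '_'
theorem takeWhile_append_underscore (u xs : List Char) (h : ('_' : Char) ∉ u) :
    (u ++ '_' :: xs).takeWhile (fun c => c != '_') = u := by
  induction u with
  | nil => simp
  | cons a t ih =>
    simp only [List.mem_cons, not_or] at h
    have ha : (a != '_') = true := by
      simp only [bne_iff_ne, ne_eq]
      exact fun hh => h.1 hh.symm
    simp [ha, ih h.2]

theorem takeWhile_of_no_underscore (u : List Char) (h : ('_' : Char) ∉ u) :
    u.takeWhile (fun c => c != '_') = u := by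
  induction u with
  | nil => rfl
  | cons a t ih =>
    simp only [List.mem_cons, not_or] at h
    have ha : (a != '_') = true := by
      simp only [bne_iff_ne, ne_eq]
      exact fun hh => h.1 hh.symm
    simp [ha, ih h.2]

-- characterisation of B's suffix extraction against A's two tests
theorem tail_eq_iff (l t : List Char) (h : ('_' : Char) ∉ t) :
    ((l.reverse.takeWhile (fun c => c != '_')).reverse = t) ↔ (t = l ∨ ('_' :: t) <:+ l) := by
  constructor
  · intro htw
    rcases hdw : l.reverse.dropWhile (fun c => c != '_') with _ | ⟨d, rest⟩
    · left
      have hsplit := List.takeWhile_append_dropWhile (p := fun c => c != '_') (l := l.reverse)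
      rw [hdw, List.append_nil] at hsplit
      rw [hsplit] at htw
      simpa using htw.symm
    · have hne : l.reverse.dropWhile (fun c => c != '_') ≠ [] := by rw [hdw]; simp
      have hhead := List.head_dropWhile_not (p := fun c => c != '_') (l := l.reverse) hne
      simp only [hdw, List.head_cons] at hhead
      have hd : d = '_' := by simpa using hhead
      right
      have hsplit := List.takeWhile_append_dropWhile (p := fun c => c != '_') (l := l.reverse)
      rw [hdw, hd] at hsplit
      have hl : l = rest.reverse ++ '_' :: t := by
        rw [← htw]
        conv_lhs => rw [← List.reverse_reverse l, ← hsplit]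
        simp
      exact ⟨rest.reverse, hl.symm⟩
  · rintro (rfl | ⟨pre, rfl⟩)
    · rw [takeWhile_of_no_underscore _ (by simpa using h)]; simp
    · rw [show (pre ++ '_' :: t).reverse = t.reverse ++ '_' :: pre.reverse by simp,
        takeWhile_append_underscore _ _ (by simpa using h)]
      simp

-- per-term bridge: A's test for one term equals "extracted last segment == term"
theorem per_term (lowered : String) (t : String) (h : ('_' : Char) ∉ t.toList) :
    ((t == lowered) || PySem.Str.endswith lowered ("_" ++ t))
      = (String.ofList ((lowered.toList.reverse.takeWhile (fun c => c != '_')).reverse) == t) := by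
  rw [Bool.eq_iff_iff]
  simp only [Bool.or_eq_true, beq_iff_eq, PySem.Str.endswith_eq, PySem.Chars.endswith_iff]
  have hl : ("_" ++ t).toList = '_' :: t.toList := by simp
  rw [hl]
  have key : (String.ofList ((lowered.toList.reverse.takeWhile (fun c => c != '_')).reverse) = t)
      ↔ ((lowered.toList.reverse.takeWhile (fun c => c != '_')).reverse = t.toList) := by
    rw [← String.toList_inj]
    simp
  rw [key, tail_eq_iff _ _ h]
  exact (or_congr (String.toList_inj (s₁ := t) (s₂ := lowered)) Iff.rfl).symm

-- ===== VERDICT (by name: the statement is the Claim_ definition above) =====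
set_option maxHeartbeats 1000000 in
theorem is_likely_noise_column_py_spec : Claim_equal_is_likely_noise_column_py := by
  intro column_name _
  unfold Spec_is_likely_noise_column_py
  simp only [is_likely_noise_column_py, is_likely_noise_column_py_alt,
    List.any_cons, List.any_nil, Bool.or_false]
  rw [per_term _ "id" (by decide), per_term _ "index" (by decide),
    per_term _ "label" (by decide), per_term _ "score" (by decide),
    per_term _ "class" (by decide), per_term _ "target" (by decide),
    per_term _ "date" (by decide), per_term _ "time" (by decide),
    per_term _ "url" (by decide), per_term _ "link" (by decide),
    per_term _ "source" (by decide), per_term _ "path" (by decide),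
    per_term _ "file" (by decide), per_term _ "name" (by decide),
    per_term _ "title" (by decide)]
  have hset : pvNoiseSet =
      ["id", "index", "label", "score", "class", "target", "date", "time",
       "url", "link", "source", "path", "file", "name", "title"] := by decide
  rw [hset, Bool.eq_iff_iff]
  simp [PySem.Set.contains]
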